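-- pv_equiv track=rewrite | github.com/Hirvensaloa/version-detection-framework | fingerprint.py | create_diff_string
-- ===== SOURCE A (Python) =====
-- def create_diff_string(diff_indices, payload, invisible=False):
--     diff_string = ''
--     strike_through = '\u0336' if not invisible else ''
--     for i in range(len(payload)):
--         if i in diff_indices:
--             diff_string += payload[i] + strike_through
--         else:
--             diff_string += payload[i] if not invisible else '\u2800'
--     return diff_string
-- ===== SOURCE B (Python) =====
-- def create_diff_string(diff_indices, payload, invisible=False):
--     # Build the no-diff form of every position, then scatter the strike forms
--     # over the diff indices (instead of testing membership at every position).
--     strike_through = '' if invisible else '\u0336'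
--     result = ['\u2800' if invisible else c for c in payload]
--     for i in diff_indices:
--         if 0 <= i < len(payload):
--             result[i] = payload[i] + strike_through
--     return ''.join(result)
-- ===== Notes on version B (the rewrite author's own statement) =====
-- stated objective: faster
-- what changed: Replaces the per-position membership scan of diff_indices with a precomputed base list and a single scatter pass over diff_indices, joined at the end instead of repeated string concatenation.
import Mathlib
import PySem

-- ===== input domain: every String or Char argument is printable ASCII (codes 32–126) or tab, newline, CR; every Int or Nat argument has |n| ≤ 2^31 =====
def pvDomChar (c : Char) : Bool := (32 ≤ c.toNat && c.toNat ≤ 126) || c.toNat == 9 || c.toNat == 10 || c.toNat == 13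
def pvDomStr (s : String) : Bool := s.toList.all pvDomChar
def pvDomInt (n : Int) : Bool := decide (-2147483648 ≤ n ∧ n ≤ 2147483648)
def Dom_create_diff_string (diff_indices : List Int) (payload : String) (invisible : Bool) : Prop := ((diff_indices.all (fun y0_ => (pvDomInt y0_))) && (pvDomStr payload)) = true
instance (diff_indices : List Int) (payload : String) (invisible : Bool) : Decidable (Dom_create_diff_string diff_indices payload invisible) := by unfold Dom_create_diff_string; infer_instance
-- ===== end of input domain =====

-- B builds the base string once and scatters the struck forms over diff_indices
-- in one pass, instead of testing membership at every payload position (faster).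

-- ===== PORT A =====
def create_diff_string (diff_indices : List Int) (payload : String) (invisible : Bool) : String :=
  let chars := payload.toList
  let strike : List Char := if !invisible then ['\u0336'] else []
  String.ofList ((PySem.List.pyRange 0 (chars.length : Int) 1).foldl (fun acc i =>
    if diff_indices.contains i then
      acc ++ (PySem.List.pyGetD chars i ' ' :: strike)
    else
      acc ++ [if !invisible then PySem.List.pyGetD chars i ' ' else '\u2800']) [])

-- ===== PORT B =====
def create_diff_string_alt (diff_indices : List Int) (payload : String) (invisible : Bool) : String :=
  let chars := payload.toList
  let strike : List Char := if invisible then [] else ['\u0336']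
  let base : List (List Char) := chars.map (fun c => if invisible then ['\u2800'] else [c])
  let final := diff_indices.foldl (fun res i =>
    if 0 ≤ i ∧ i < (chars.length : Int) then
      PySem.List.pySetD res i (PySem.List.pyGetD chars i ' ' :: strike)
    else res) base
  String.ofList final.flatten

-- ===== PRECONDITION & SPEC =====
def Spec_create_diff_string (diff_indices : List Int) (payload : String) (invisible : Bool) (out : String) : Prop := out = create_diff_string_alt diff_indices payload invisible
instance (diff_indices : List Int) (payload : String) (invisible : Bool) (out : String) : Decidable (Spec_create_diff_string diff_indices payload invisible out) := by unfold Spec_create_diff_string; infer_instance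

-- ===== CLAIM (what is proved, stated in full; the proofs are below) =====
def Claim_equal_create_diff_string : Prop := ∀ (diff_indices : List Int) (payload : String) (invisible : Bool), Dom_create_diff_string diff_indices payload invisible → Spec_create_diff_string diff_indices payload invisible (create_diff_string diff_indices payload invisible)

-- ===== LEMMAS AND PROOFS =====

-- The scatter fold of B: length is preserved and position k holds the update
-- value iff (k : Int) occurs in the index list (the written value depends only
-- on the position, so duplicates and order do not matter).
theorem pv_scatter_spec (n : Nat) (val : Int → List Char) :
    ∀ (l : List Int) (base : List (List Char)), base.length = n →
      (l.foldl (fun res i => if 0 ≤ i ∧ i < (n : Int) then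
          PySem.List.pySetD res i (val i) else res) base).length = n ∧
      ∀ (k : Nat),
        (l.foldl (fun res i => if 0 ≤ i ∧ i < (n : Int) then
            PySem.List.pySetD res i (val i) else res) base)[k]? =
          if (k : Int) ∈ l ∧ k < n then some (val k) else base[k]? := by
  intro l
  induction l with
  | nil =>
      intro base hlen
      refine ⟨hlen, ?_⟩
      intro k
      simp
  | cons i l ih =>
      intro base hlen
      have hlen' : (if 0 ≤ i ∧ i < (n : Int) then
          PySem.List.pySetD base i (val i) else base).length = n := by
        split
        · simpa [PySem.List.length_pySetD] using hlen
        · exact hlen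
      obtain ⟨hL, hG⟩ := ih _ hlen'
      refine ⟨by simpa [List.foldl_cons] using hL, ?_⟩
      intro k
      simp only [List.foldl_cons]
      rw [hG k]
      by_cases hmem : (k : Int) ∈ l ∧ k < n
      · rw [if_pos hmem, if_pos ⟨List.mem_cons_of_mem _ hmem.1, hmem.2⟩]
      · rw [if_neg hmem]
        by_cases hik : i = (k : Int) ∧ k < n
        · obtain ⟨h1, hk⟩ := hik
          subst h1
          have h0 : (0 : Int) ≤ (k : Int) := Int.natCast_nonneg k
          have hkn : ((k : Nat) : Int) < (n : Int) := by exact_mod_cast hk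
          rw [if_pos ⟨h0, hkn⟩, PySem.List.pySetD_of_nonneg _ _ h0]
          have htn : (((k : Nat) : Int)).toNat = k := Int.toNat_natCast k
          rw [htn, List.getElem?_set_self (by omega),
              if_pos ⟨List.mem_cons_self, hk⟩]
        · have hne : ¬ ((k : Int) ∈ i :: l ∧ k < n) := by
            rintro ⟨hm, hk⟩
            rcases List.mem_cons.mp hm with h1 | h2
            · exact hik ⟨h1.symm, hk⟩
            · exact hmem ⟨h2, hk⟩
          rw [if_neg hne]
          split
          · rename_i hcond
            rw [PySem.List.pySetD_of_nonneg _ _ hcond.1]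
            refine List.getElem?_set_ne ?_
            rcases hcond with ⟨hc0, hcn⟩
            intro habs
            apply hik
            constructor
            · omega
            · omega
          · rfl

-- B's final list equals the position-indexed map that A produces segments of.
theorem pv_final_eq_map (diff_indices : List Int) (chars : List Char) (invisible : Bool) :
    (diff_indices.foldl (fun res i =>
        if 0 ≤ i ∧ i < (chars.length : Int) then
          PySem.List.pySetD res i
            (PySem.List.pyGetD chars i ' ' :: (if invisible then [] else ['\u0336']))
        else res)
      (chars.map (fun c => if invisible then ['\u2800'] else [c]))) =
    (List.range chars.length).map (fun k =>
      if diff_indices.contains ((k : Nat) : Int) then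
        PySem.List.pyGetD chars (k : Int) ' ' :: (if !invisible then ['\u0336'] else [])
      else
        [if !invisible then PySem.List.pyGetD chars (k : Int) ' ' else '\u2800']) := by
  obtain ⟨hL, hG⟩ := pv_scatter_spec chars.length
    (fun i => PySem.List.pyGetD chars i ' ' :: (if invisible then [] else ['\u0336']))
    diff_indices (chars.map (fun c => if invisible then ['\u2800'] else [c])) (by simp)
  apply List.ext_getElem?
  intro k
  rw [hG k]
  by_cases hk : k < chars.length
  · have hget : PySem.List.pyGetD chars ((k : Nat) : Int) ' ' = chars[k] :=
      PySem.List.pyGetD_ofNat chars k ' ' hk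
    by_cases hmem : (k : Int) ∈ diff_indices
    · have hc : diff_indices.contains ((k : Nat) : Int) = true := by
        simpa using hmem
      cases invisible <;>
        simp [hmem, hk, hget]
    · have hc : diff_indices.contains ((k : Nat) : Int) = false := by
        simpa using hmem
      cases invisible <;>
        simp [hmem, hk]
  · have h1 : ¬ ((k : Int) ∈ diff_indices ∧ k < chars.length) := by
      intro h; exact hk h.2
    rw [if_neg h1]
    have hk' : chars.length ≤ k := Nat.le_of_not_lt hk
    rw [List.getElem?_eq_none (by simpa using hk'),
        List.getElem?_eq_none (by simpa using hk')]

-- ===== VERDICT (by name: the statement is the Claim_ definition above) =====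
theorem create_diff_string_spec : Claim_equal_create_diff_string := by
  intro diff_indices payload invisible _
  unfold Spec_create_diff_string create_diff_string create_diff_string_alt
  simp only []
  rw [pv_final_eq_map]
  congr 1
  have hbody : (fun (acc : List Char) (i : Int) =>
      if diff_indices.contains i then
        acc ++ (PySem.List.pyGetD payload.toList i ' ' :: (if !invisible then ['\u0336'] else []))
      else
        acc ++ [if !invisible then PySem.List.pyGetD payload.toList i ' ' else '\u2800']) =
      (fun acc i => acc ++ (if diff_indices.contains i then
        PySem.List.pyGetD payload.toList i ' ' :: (if !invisible then ['\u0336'] else [])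
      else
        [if !invisible then PySem.List.pyGetD payload.toList i ' ' else '\u2800'])) := by
    funext acc i
    split <;> rfl
  rw [hbody, PySem.List.foldl_append_eq_flatMap, PySem.List.pyRange_one]
  simp only [Int.sub_zero, Int.toNat_natCast, List.flatMap_def, List.map_map, List.nil_append]
  congr 1
  apply List.map_congr_left
  intro k _
  simp
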